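-- pv_equiv track=rewrite | github.com/AP-MI-2021/lab-4-AverageLinuxEnjoyer | first_n_positives_sum.py | first_n_positive
-- ===== SOURCE A (Python) =====
-- def first_n_positive(lst: list[int], n: int) -> list[int]:
--     """Returneaza o lista cu elementele pozitive ale altei
--
--     Args:
--         lst (list[int]): Lista din care sunt extrase numerele pozitive
--         n (int): Numarul de numere pozitive inserate in lista noua
--
--     Returns:
--         list[int]: Noua lista cu n elemente pozitive. Daca n este mai mica decat numarul de elemente pozitive din lista initiala, se returneaza None in loc
--     """
--     positives_list = []
--
--     if n == 0:
--         return []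
--
--     positives = 0
--     for x in lst:
--         if x>=0:
--             positives_list.append(x)
--             positives+=1
--         if positives == n:
--             return positives_list
--
--     return None
-- ===== SOURCE B (Python) =====
-- def first_n_positive(lst: list[int], n: int) -> list[int]:
--     positives = [x for x in lst if x >= 0]
--     if 0 <= n <= len(positives):
--         return positives[:n]
--     return None
-- ===== Notes on version B (the rewrite author's own statement) =====
-- stated objective: simpler
-- what changed: B replaces A's counter-driven loop with early return by a single filter of all non-negative elements followed by a length test and a slice.
import Mathlib
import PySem

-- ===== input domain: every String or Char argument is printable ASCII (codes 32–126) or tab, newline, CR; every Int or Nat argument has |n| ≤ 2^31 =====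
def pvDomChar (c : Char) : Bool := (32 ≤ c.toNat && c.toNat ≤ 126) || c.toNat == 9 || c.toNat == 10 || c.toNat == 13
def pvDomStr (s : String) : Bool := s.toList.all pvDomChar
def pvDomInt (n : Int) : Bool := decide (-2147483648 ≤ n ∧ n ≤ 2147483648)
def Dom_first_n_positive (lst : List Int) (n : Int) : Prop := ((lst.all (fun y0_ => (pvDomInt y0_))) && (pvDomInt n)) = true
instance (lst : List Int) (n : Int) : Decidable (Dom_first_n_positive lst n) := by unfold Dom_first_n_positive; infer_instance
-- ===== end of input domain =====

-- ===== PORT A =====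
-- A's loop: append non-negatives to an accumulator, counting; return the accumulator
-- as soon as the count reaches n; none if the list ends first.
def firstNPosLoop (n : Int) : List Int → List Int → Int → Option (List Int)
  | [], _, _ => none
  | x :: xs, acc, cnt =>
    let acc' := if 0 ≤ x then acc ++ [x] else acc
    let cnt' := if 0 ≤ x then cnt + 1 else cnt
    if cnt' = n then some acc' else firstNPosLoop n xs acc' cnt'

def first_n_positive (lst : List Int) (n : Int) : Option (List Int) :=
  if n = 0 then some [] else firstNPosLoop n lst [] 0

-- ===== PORT B =====
-- B: filter all non-negatives once, then decide from the length alone and slice.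
def first_n_positive_alt (lst : List Int) (n : Int) : Option (List Int) :=
  let positives := lst.filter (fun x => 0 ≤ x)
  if 0 ≤ n ∧ n ≤ positives.length then some (positives.take n.toNat) else none

-- ===== PRECONDITION & SPEC =====
def Spec_first_n_positive (lst : List Int) (n : Int) (out : Option (List Int)) : Prop := out = first_n_positive_alt lst n
instance (lst : List Int) (n : Int) (out : Option (List Int)) : Decidable (Spec_first_n_positive lst n out) := by unfold Spec_first_n_positive; infer_instance

-- ===== CLAIM (what is proved, stated in full; the proofs are below) =====
def Claim_equal_first_n_positive : Prop := ∀ (lst : List Int) (n : Int), Dom_first_n_positive lst n → Spec_first_n_positive lst n (first_n_positive lst n)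

-- ===== LEMMAS AND PROOFS =====

theorem firstNPosLoop_neg (n : Int) (hn : n < 0) :
    ∀ (lst acc : List Int) (cnt : Int), 0 ≤ cnt → firstNPosLoop n lst acc cnt = none := by
  intro lst
  induction lst with
  | nil => intro acc cnt _; rfl
  | cons x xs ih =>
    intro acc cnt hc
    simp only [firstNPosLoop]
    split_ifs with hx h h2
    · omega
    · exact ih _ _ (by omega)
    · omega
    · exact ih _ _ hc

theorem firstNPosLoop_eq (n : Int) :
    ∀ (lst acc : List Int) (cnt : Int), cnt < n →
      firstNPosLoop n lst acc cnt =
        (if n ≤ cnt + (lst.filter (fun x => 0 ≤ x)).length then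
          some (acc ++ (lst.filter (fun x => 0 ≤ x)).take (n - cnt).toNat) else none) := by
  intro lst
  induction lst with
  | nil =>
    intro acc cnt hc
    simp [firstNPosLoop]
    omega
  | cons x xs ih =>
    intro acc cnt hc
    by_cases hx : 0 ≤ x
    · simp only [firstNPosLoop, if_pos hx, List.filter_cons, hx, decide_true, if_pos]
      by_cases hdone : cnt + 1 = n
      · have hcond : n ≤ cnt + (x :: xs.filter (fun x => 0 ≤ x)).length := by
          simp [List.length_cons]; omega
        rw [if_pos hdone, if_pos hcond]
        have : (n - cnt).toNat = 1 := by omega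
        simp [this]
      · rw [if_neg hdone, ih (acc ++ [x]) (cnt + 1) (by omega)]
        have hlen : (x :: xs.filter (fun x => 0 ≤ x)).length = (xs.filter (fun x => 0 ≤ x)).length + 1 := by
          simp
        by_cases hcond : n ≤ cnt + 1 + (xs.filter (fun x => 0 ≤ x)).length
        · rw [if_pos hcond, if_pos (by omega)]
          have htak : (n - cnt).toNat = (n - (cnt + 1)).toNat + 1 := by omega
          simp [htak, List.take_succ_cons]
        · rw [if_neg hcond, if_neg (by omega)]
    · have hxne : ¬ cnt = n := by omega
      simp only [firstNPosLoop, if_neg hx, List.filter_cons, hx, decide_false, if_neg hxne,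
        Bool.false_eq_true, if_false]
      exact ih acc cnt hc

-- ===== VERDICT (by name: the statement is the Claim_ definition above) =====
theorem first_n_positive_spec : Claim_equal_first_n_positive := by
  intro lst n _
  unfold Spec_first_n_positive first_n_positive first_n_positive_alt
  rcases lt_trichotomy n 0 with hn | hn | hn
  · rw [if_neg (by omega), firstNPosLoop_neg n hn lst [] 0 le_rfl]
    simp; omega
  · subst hn; simp
  · rw [if_neg (by omega), firstNPosLoop_eq n lst [] 0 hn]
    simp only [zero_add, Int.sub_zero]
    split_ifs with h1 h2 h2 <;> simp_all <;> omega
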